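-- pv_equiv track=rewrite | github.com/yashwanth-lingareddy/dsa | techie-delight/16_maximum_continuous_sequence.py | find_index_of_zero
-- ===== SOURCE A (Python) =====
-- from typing import List
--
-- def find_index_of_zero(nums: List[int]):
--     if 0 not in nums:
--         return -1
--     i = 0
--     start_index_of_window = -1
--     largest_window_length = 0
--     index_of_zero_to_be_replaced = -1
--     while i < len(nums):
--         start_index_of_window = i
--         end_index_of_window = i
--         zeros_in_this_window = 0
--         index_of_first_zero_in_this_window = -1
--         index_of_second_zero_in_this_window = -1
--         while end_index_of_window < len(nums):
--             if nums[end_index_of_window] == 0: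
--                 zeros_in_this_window += 1
--                 if zeros_in_this_window == 1:
--                     index_of_first_zero_in_this_window = end_index_of_window
--                 if zeros_in_this_window == 2:
--                     index_of_second_zero_in_this_window = end_index_of_window
--                     break
--             end_index_of_window += 1
--         this_window = nums[start_index_of_window:(end_index_of_window - 1) + 1]
--         if len(this_window) > largest_window_length:
--             largest_window_length = len(this_window)
--             index_of_zero_to_be_replaced = index_of_first_zero_in_this_window
--         if index_of_first_zero_in_this_window == -1:
--             break
--         i = index_of_first_zero_in_this_window + 1
--
--     return index_of_zero_to_be_replaced
-- ===== SOURCE B (Python) =====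
-- def find_index_of_zero(nums):
--     zpos = [i for i, x in enumerate(nums) if x == 0]
--     if not zpos:
--         return -1
--     best_len, best_idx = 0, -1
--     prev = -1
--     for z, nxt in zip(zpos, zpos[1:] + [len(nums)]):
--         cand = nxt - prev - 1
--         if cand > best_len:
--             best_len, best_idx = cand, z
--         prev = z
--     return best_idx
-- ===== Notes on version B (the rewrite author's own statement) =====
-- stated objective: alternative
-- what changed: A rescans a fresh window from each zero (nested while loops plus a slice per window); B collects all zero positions in one pass and computes each candidate run length from the neighbouring zero positions (with -1/len sentinels) in a single scan over that list.
import Mathlib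
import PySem

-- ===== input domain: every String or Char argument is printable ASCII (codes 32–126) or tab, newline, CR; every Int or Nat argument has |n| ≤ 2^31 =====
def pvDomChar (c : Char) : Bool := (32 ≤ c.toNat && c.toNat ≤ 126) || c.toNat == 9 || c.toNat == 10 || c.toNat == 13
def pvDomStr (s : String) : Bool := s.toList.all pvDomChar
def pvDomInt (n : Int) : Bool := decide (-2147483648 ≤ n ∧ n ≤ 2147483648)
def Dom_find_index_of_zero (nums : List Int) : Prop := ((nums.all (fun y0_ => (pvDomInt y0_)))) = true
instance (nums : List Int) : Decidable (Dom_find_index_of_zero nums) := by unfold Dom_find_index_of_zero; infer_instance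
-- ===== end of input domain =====

-- B replaces A's nested rescanning window search by a single pass over the collected zero
-- positions with -1/len sentinels (objective: alternative algorithm); return values agree on every input.

-- ===== PORT A =====
-- inner `while end_index_of_window < len(nums)` loop; state (end, zeros, first, second),
-- returns (end_index_of_window, index_of_first_zero_in_this_window, index_of_second_zero_in_this_window).
-- fuel is a pure totality guard: the loop runs at most nums.length - endIdx more iterations,
-- so any fuel with nums.length ≤ endIdx + fuel reproduces the Python loop exactly.
def pvInnerA (nums : List Int) (fuel : Nat) (endIdx : Nat) (zeros first second : Int) : Nat × Int × Int :=
  match fuel with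
  | 0 => (endIdx, first, second)
  | fuel + 1 =>
    if h : endIdx < nums.length then
      if nums[endIdx] = 0 then
        let zeros' := zeros + 1
        let first' := if zeros' = 1 then (endIdx : Int) else first
        if zeros' = 2 then (endIdx, first', (endIdx : Int))   -- break
        else pvInnerA nums fuel (endIdx + 1) zeros' first' second
      else pvInnerA nums fuel (endIdx + 1) zeros first second
    else (endIdx, first, second)

-- outer `while i < len(nums)` loop; state (i, largest_window_length, index_of_zero_to_be_replaced).
-- fuel is again only a totality guard: i strictly increases each iteration, so
-- any fuel with nums.length < i + fuel reproduces the Python loop exactly.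
def pvOuterA (nums : List Int) (fuel : Nat) (i : Nat) (largest idx : Int) : Int :=
  match fuel with
  | 0 => idx
  | fuel + 1 =>
    if i < nums.length then
      let r := pvInnerA nums nums.length i 0 (-1) (-1)
      let window := PySem.List.slice nums (some (i : Int)) (some ((r.1 : Int) - 1 + 1))
      let largest' := if (window.length : Int) > largest then (window.length : Int) else largest
      let idx' := if (window.length : Int) > largest then r.2.1 else idx
      if r.2.1 = -1 then idx'
      else pvOuterA nums fuel (r.2.1.toNat + 1) largest' idx'
    else idx

def find_index_of_zero (nums : List Int) : Int :=
  if (0 : Int) ∉ nums then -1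
  else pvOuterA nums (nums.length + 1) 0 0 (-1)

-- ===== PORT B =====
def find_index_of_zero_alt (nums : List Int) : Int :=
  let zpos := ((PySem.List.enumerate nums 0).filter (fun p => p.2 == 0)).map (fun p => p.1)
  if zpos = [] then -1
  else
    let st := (zpos.zip (zpos.drop 1 ++ [(nums.length : Int)])).foldl
      (fun (st : Int × Int × Int) (p : Int × Int) =>
        let cand := p.2 - st.2.2 - 1
        if cand > st.1 then (cand, p.1, p.1) else (st.1, st.2.1, p.1))
      (0, -1, -1)
    st.2.1

-- ===== PRECONDITION & SPEC =====
def Spec_find_index_of_zero (nums : List Int) (out : Int) : Prop := out = find_index_of_zero_alt nums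
instance (nums : List Int) (out : Int) : Decidable (Spec_find_index_of_zero nums out) := by unfold Spec_find_index_of_zero; infer_instance

-- ===== CLAIM (what is proved, stated in full; the proofs are below) =====
def Claim_equal_find_index_of_zero : Prop := ∀ (nums : List Int), Dom_find_index_of_zero nums → Spec_find_index_of_zero nums (find_index_of_zero nums)

-- ===== LEMMAS AND PROOFS =====

-- positions (as Nat, labelled from k) of the zeros of a list
def pvZerosAux : List Int → Nat → List Nat
  | [], _ => []
  | x :: xs, k => if x = 0 then k :: pvZerosAux xs (k + 1) else pvZerosAux xs (k + 1)

theorem pvZerosAux_eq_nil_iff (xs : List Int) (k : Nat) :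
    pvZerosAux xs k = [] ↔ (0 : Int) ∉ xs := by
  induction xs generalizing k with
  | nil => simp [pvZerosAux]
  | cons x xs ih =>
    simp only [pvZerosAux, List.mem_cons]
    by_cases hx : x = 0
    · subst hx; simp
    · rw [if_neg hx, ih (k + 1)]
      constructor
      · intro h hc
        rcases hc with hc | hc
        · exact hx hc.symm
        · exact h hc
      · intro h hc
        exact h (Or.inr hc)

-- B's zero-position list is pvZerosAux, cast to Int
-- Int-indexed zero positions (matches enumerate's Int counter)
def pvZerosI : List Int → Int → List Int
  | [], _ => []
  | x :: xs, s => if x = 0 then s :: pvZerosI xs (s + 1) else pvZerosI xs (s + 1)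

theorem pvEnum_filter_eq (xs : List Int) : ∀ (s : Int),
    (((PySem.List.enumerate xs s).filter (fun p => p.2 == 0)).map (fun p => p.1)) =
      pvZerosI xs s := by
  induction xs with
  | nil => intro s; simp [pvZerosI, PySem.List.enumerate_nil]
  | cons x xs ih =>
    intro s
    rw [PySem.List.enumerate_cons, List.filter_cons]
    by_cases hx : x = 0
    · simp only [pvZerosI, hx, if_pos]
      simp [ih (s + 1)]
    · simp only [pvZerosI, hx, if_false, ite_false]
      simp [hx, ih (s + 1)]

theorem pvZerosI_natCast (xs : List Int) : ∀ (k : Nat),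
    pvZerosI xs (k : Int) = (pvZerosAux xs k).map (fun z => Int.ofNat z) := by
  induction xs with
  | nil => intro k; rfl
  | cons x xs ih =>
    intro k
    show (if x = 0 then (k : Int) :: pvZerosI xs ((k : Int) + 1) else pvZerosI xs ((k : Int) + 1)) = _
    rw [show ((k : Int) + 1) = ((k + 1 : Nat) : Int) by push_cast; ring, ih (k + 1)]
    by_cases hx : x = 0
    · rw [if_pos hx, show pvZerosAux (x :: xs) k = k :: pvZerosAux xs (k + 1) by
        simp [pvZerosAux, hx], List.map_cons]
      rfl
    · rw [if_neg hx, show pvZerosAux (x :: xs) k = pvZerosAux xs (k + 1) by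
        simp [pvZerosAux, hx]]

-- one scan step of the suffix view
theorem pvZerosAux_drop_step (nums : List Int) (e : Nat) (h : e < nums.length) :
    pvZerosAux (nums.drop e) e =
      if nums[e] = 0 then e :: pvZerosAux (nums.drop (e + 1)) (e + 1)
      else pvZerosAux (nums.drop (e + 1)) (e + 1) := by
  rw [List.drop_eq_getElem_cons h]
  rfl

-- head decomposition of the suffix zero list
theorem pvZerosAux_head (nums : List Int) :
    ∀ (fuel e : Nat) (z : Nat) (rest : List Nat), nums.length - e ≤ fuel →
    pvZerosAux (nums.drop e) e = z :: rest →
    e ≤ z ∧ z < nums.length ∧ pvZerosAux (nums.drop (z + 1)) (z + 1) = rest := by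
  intro fuel
  induction fuel with
  | zero =>
    intro e z rest hf hz
    have he : nums.length ≤ e := by omega
    simp [List.drop_eq_nil_of_le he, pvZerosAux] at hz
  | succ n ih =>
    intro e z rest hf hz
    by_cases he : e < nums.length
    · rw [pvZerosAux_drop_step nums e he] at hz
      by_cases h0 : nums[e] = 0
      · simp only [h0, if_true] at hz
        obtain ⟨h1, h2⟩ := List.cons.inj hz
        subst h1; exact ⟨le_refl _, he, h2.symm ▸ rfl⟩
      · simp only [h0, if_false] at hz
        obtain ⟨h1, h2, h3⟩ := ih (e + 1) z rest (by omega) hz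
        exact ⟨by omega, h2, h3⟩
    · have : nums.length ≤ e := by omega
      simp [List.drop_eq_nil_of_le this, pvZerosAux] at hz

-- inner loop from a state that has already seen one zero
theorem pvInnerA_one (nums : List Int) :
    ∀ (fuel e : Nat) (f s : Int), nums.length - e ≤ fuel → e ≤ nums.length →
    pvInnerA nums fuel e 1 f s =
      match pvZerosAux (nums.drop e) e with
      | [] => (nums.length, f, s)
      | z' :: _ => (z', f, (z' : Int)) := by
  intro fuel
  induction fuel with
  | zero =>
    intro e f s hf he
    have he' : e = nums.length := by omega
    subst he'
    simp [pvInnerA, List.drop_eq_nil_of_le (le_refl _), pvZerosAux]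
  | succ n ih =>
    intro e f s hf he
    by_cases hlt : e < nums.length
    · rw [pvInnerA]
      simp only [hlt, dif_pos]
      by_cases h0 : nums[e] = 0
      · simp only [h0, if_pos]
        norm_num
        rw [pvZerosAux_drop_step nums e hlt]
        simp [h0]
      · simp only [h0, if_neg, if_false]
        rw [ih (e + 1) f s (by omega) (by omega)]
        rw [pvZerosAux_drop_step nums e hlt]
        simp [h0]
    · have he' : e = nums.length := by omega
      subst he'
      simp [pvInnerA, hlt, List.drop_eq_nil_of_le (le_refl _), pvZerosAux]

-- inner loop from the fresh state
theorem pvInnerA_zero (nums : List Int) :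
    ∀ (fuel e : Nat), nums.length - e ≤ fuel → e ≤ nums.length →
    pvInnerA nums fuel e 0 (-1) (-1) =
      match pvZerosAux (nums.drop e) e with
      | [] => (nums.length, -1, -1)
      | [z] => (nums.length, (z : Int), -1)
      | z :: z' :: _ => (z', (z : Int), (z' : Int)) := by
  intro fuel
  induction fuel with
  | zero =>
    intro e hf he
    have he' : e = nums.length := by omega
    subst he'
    simp [pvInnerA, List.drop_eq_nil_of_le (le_refl _), pvZerosAux]
  | succ n ih =>
    intro e hf he
    by_cases hlt : e < nums.length
    · rw [pvInnerA]
      simp only [hlt, dif_pos]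
      by_cases h0 : nums[e] = 0
      · simp only [h0, if_pos]
        norm_num
        rw [pvInnerA_one nums n (e + 1) (e : Int) (-1) (by omega) (by omega)]
        rw [pvZerosAux_drop_step nums e hlt]
        simp [h0]
        cases pvZerosAux (nums.drop (e + 1)) (e + 1) <;> simp
      · simp only [h0, if_neg, if_false]
        rw [ih (e + 1) (by omega) (by omega)]
        rw [pvZerosAux_drop_step nums e hlt]
        simp [h0]
    · have he' : e = nums.length := by omega
      subst he'
      simp [pvInnerA, hlt, List.drop_eq_nil_of_le (le_refl _), pvZerosAux]

-- B's fold, written as recursion over the zero list ('next' = head of the rest, or len)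
def pvLoopB (n : Int) : Int × Int × Int → List Int → Int
  | st, [] => st.2.1
  | st, z :: rest =>
      let nxt := match rest with | [] => n | z' :: _ => z'
      let cand := nxt - st.2.2 - 1
      pvLoopB n (if cand > st.1 then (cand, z, z) else (st.1, st.2.1, z)) rest

theorem pvFold_eq_loop (n : Int) :
    ∀ (zs : List Int) (st : Int × Int × Int),
    ((zs.zip (zs.drop 1 ++ [n])).foldl
      (fun (st : Int × Int × Int) (p : Int × Int) =>
        let cand := p.2 - st.2.2 - 1
        if cand > st.1 then (cand, p.1, p.1) else (st.1, st.2.1, p.1)) st).2.1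
      = pvLoopB n st zs := by
  intro zs
  induction zs with
  | nil => intro st; simp [pvLoopB]
  | cons z rest ih =>
    intro st
    cases rest with
    | nil => simp [pvLoopB]
    | cons z' rs =>
      simp only [List.drop_succ_cons, List.drop_zero] at ih ⊢
      rw [List.cons_append, List.zip_cons_cons, List.foldl_cons, ih]
      conv_rhs => rw [pvLoopB]

-- window length: A's slice nums[i:end] has length end - i
theorem pvWindow_length (nums : List Int) (i e : Nat) (hie : i ≤ e) (he : e ≤ nums.length) :
    (PySem.List.slice nums (some (i : Int)) (some ((e : Int) - 1 + 1))).length = e - i := by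
  have : (e : Int) - 1 + 1 = (e : Int) := by ring
  rw [this, PySem.List.slice_natCast]
  simp [List.length_take, List.length_drop]
  omega

-- the outer loop computes pvLoopB over the remaining zero positions
theorem pvOuter_eq (nums : List Int) :
    ∀ (fuel e : Nat) (largest idx : Int), nums.length < e + fuel → e ≤ nums.length →
    (pvZerosAux (nums.drop e) e = [] → (nums.length : Int) - e ≤ largest) →
    pvOuterA nums fuel e largest idx =
      pvLoopB (nums.length : Int) (largest, idx, (e : Int) - 1)
        ((pvZerosAux (nums.drop e) e).map (fun z => Int.ofNat z)) := by
  intro fuel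
  induction fuel with
  | zero =>
    intro e largest idx hf he hH
    omega
  | succ n ih =>
    intro e largest idx hf he hH
    by_cases hlt : e < nums.length
    · rw [pvOuterA]
      simp only [hlt, if_pos]
      rw [pvInnerA_zero nums nums.length e (by omega) he]
      rcases hzl : pvZerosAux (nums.drop e) e with _ | ⟨z, rest⟩
      · -- no zero at or after e: A's trailing window cannot win (hH), both return idx
        simp only [hzl]
        rw [pvWindow_length nums e nums.length he (le_refl _)]
        have hc : ¬ (((nums.length - e : Nat) : Int) > largest) := by
          have := hH hzl
          have : ((nums.length - e : Nat) : Int) = (nums.length : Int) - e := by omega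
          omega
        rw [if_neg hc]
        simp [pvLoopB]
      · obtain ⟨hez, hzlen, htail⟩ := pvZerosAux_head nums nums.length e z rest (by omega) hzl
        rcases rest with _ | ⟨z', rest'⟩
        · -- exactly one zero left, at z: window is nums[e:len]
          simp only [hzl]
          rw [pvWindow_length nums e nums.length he (le_refl _)]
          have hne : ¬ ((z : Int) = -1) := by omega
          rw [if_neg hne]
          have hcast : ((nums.length - e : Nat) : Int) = (nums.length : Int) - e := by omega
          rw [hcast]
          have htn : ((z : Int)).toNat + 1 = z + 1 := by omega
          rw [htn]
          have hih := ih (z + 1)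
            (if (nums.length : Int) - e > largest then (nums.length : Int) - e else largest)
            (if (nums.length : Int) - e > largest then (z : Int) else idx)
            (by omega) (by omega)
            (by
              intro _
              by_cases hc : (nums.length : Int) - e > largest
              · rw [if_pos hc]; push_cast; omega
              · rw [if_neg hc]; push_cast; omega)
          rw [htail] at hih
          simp only [List.map_nil, pvLoopB] at hih
          have h1 : (nums.length : Int) - ((e : Int) - 1) - 1 = (nums.length : Int) - (e : Int) := by
            ring
          by_cases hc : (nums.length : Int) - e > largest
          · simp only [if_pos hc] at hih ⊢
            rw [hih]
            simp only [List.map_cons, List.map_nil, pvLoopB]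
            rw [h1, if_pos hc]
            simp [Int.ofNat_eq_natCast]
          · simp only [if_neg hc] at hih ⊢
            rw [hih]
            simp only [List.map_cons, List.map_nil, pvLoopB]
            rw [h1, if_neg hc]
        · -- at least two zeros left: window is nums[e:z']
          obtain ⟨hez', hz'len, _⟩ := pvZerosAux_head nums nums.length (z + 1) z' rest' (by omega) htail
          simp only [hzl]
          rw [pvWindow_length nums e z' (by omega) (by omega)]
          have hne : ¬ ((z : Int) = -1) := by omega
          rw [if_neg hne]
          have hcast : ((z' - e : Nat) : Int) = (z' : Int) - e := by omega
          rw [hcast]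
          have htn : ((z : Int)).toNat + 1 = z + 1 := by omega
          rw [htn]
          have hih := ih (z + 1)
            (if (z' : Int) - e > largest then (z' : Int) - e else largest)
            (if (z' : Int) - e > largest then (z : Int) else idx)
            (by omega) (by omega)
            (by intro h; rw [htail] at h; simp at h)
          rw [htail] at hih
          have h1 : Int.ofNat z' - ((e : Int) - 1) - 1 = (z' : Int) - (e : Int) := by
            push_cast [Int.ofNat_eq_natCast]; ring
          have h2 : ((z + 1 : Nat) : Int) - 1 = Int.ofNat z := by
            push_cast [Int.ofNat_eq_natCast]; ring
          by_cases hc : (z' : Int) - e > largest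
          · simp only [if_pos hc] at hih ⊢
            rw [hih, h2]
            simp only [List.map_cons, pvLoopB]
            rw [h1, if_pos hc]
            simp [Int.ofNat_eq_natCast]
          · simp only [if_neg hc] at hih ⊢
            rw [hih, h2]
            simp only [List.map_cons, pvLoopB]
            rw [h1, if_neg hc]
    · have he' : e = nums.length := by omega
      subst he'
      rw [pvOuterA]
      simp [hlt, List.drop_eq_nil_of_le (le_refl nums.length), pvZerosAux, pvLoopB]

theorem find_index_of_zero_spec' (nums : List Int) :
    find_index_of_zero nums = find_index_of_zero_alt nums := by
  unfold find_index_of_zero find_index_of_zero_alt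
  rw [pvEnum_filter_eq nums 0]
  have h0 := pvZerosI_natCast nums 0
  norm_num at h0
  rw [h0]
  by_cases hm : (0 : Int) ∈ nums
  · have hz : pvZerosAux nums 0 ≠ [] := by
      rw [ne_eq, pvZerosAux_eq_nil_iff]; simp [hm]
    simp only [hm, not_true_eq_false, if_false, ite_false, List.map_eq_nil_iff, hz]
    rw [pvFold_eq_loop]
    have := pvOuter_eq nums (nums.length + 1) 0 0 (-1) (by omega) (by omega)
      (by intro h; rw [List.drop_zero] at h; exact absurd h hz)
    rw [List.drop_zero] at this
    rw [this]
    norm_num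
  · simp [hm, (pvZerosAux_eq_nil_iff nums 0).2 hm]

-- ===== VERDICT (by name: the statement is the Claim_ definition above) =====
theorem find_index_of_zero_spec : Claim_equal_find_index_of_zero := by
  intro nums _
  unfold Spec_find_index_of_zero
  exact find_index_of_zero_spec' nums
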